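-- pv_equiv track=rewrite | github.com/Zirkul/plugins | modules/integrations/sonarqube.py | find_cwe_in_txt
-- ===== SOURCE A (Python) =====
-- def find_cwe_in_txt(search_in):
--     try:
--         if not isinstance(search_in, str) or len(search_in) < 5:
--             return None
--         txt = search_in.lower().replace(' ', '')
--         ini = txt.find('cwe-')
--         cwe_id = ''
--         if ini != -1:
--             cwe_done = False
--             while not cwe_done:
--                 character = txt[ini]
--                 if character in 'cwe - 1234567890':
--                     cwe_id = f'{cwe_id}{character}'
--                     ini += 1
--                     if ini >= len(txt):
--                         cwe_done = True
--                 else: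
--                     cwe_done = True
--         if cwe_id != '':
--             cwe_id = cwe_id.replace(' ', '')
--             return str(cwe_id).upper()
--     except Exception as e:
--         return None
--     return None
-- ===== SOURCE B (Python) =====
-- def find_cwe_in_txt(search_in):
--     if not isinstance(search_in, str) or len(search_in) < 5:
--         return None
--     txt = search_in.lower().replace(' ', '')
--     pos = txt.find('cwe-')
--     if pos == -1:
--         return None
--     tail = txt[pos:]
--     # length of the leading run of CWE-id characters = what lstrip removes
--     token = tail[:len(tail) - len(tail.lstrip('cwe0123456789-'))]
--     return token.upper()
-- ===== Notes on version B (the rewrite author's own statement) =====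
-- stated objective: simpler
-- what changed: The index-driven while loop that appends one character at a time (with its done-flag and bound check) is replaced by slicing: the token is the leading run of CWE-id characters of txt[pos:], measured loop-free as len(tail)-len(tail.lstrip('cwe0123456789-')), and the try/except and the no-op space-replace on the result are dropped.
import Mathlib
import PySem

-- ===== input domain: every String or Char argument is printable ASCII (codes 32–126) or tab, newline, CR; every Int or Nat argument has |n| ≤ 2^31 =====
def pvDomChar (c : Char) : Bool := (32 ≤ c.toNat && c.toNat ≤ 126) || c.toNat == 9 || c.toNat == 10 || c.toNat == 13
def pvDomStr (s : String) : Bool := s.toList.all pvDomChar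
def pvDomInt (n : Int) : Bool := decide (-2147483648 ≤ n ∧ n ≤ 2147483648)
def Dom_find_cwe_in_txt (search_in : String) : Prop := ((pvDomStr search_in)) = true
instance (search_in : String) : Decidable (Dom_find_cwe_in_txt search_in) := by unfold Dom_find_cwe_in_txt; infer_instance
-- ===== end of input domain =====

-- B replaces A's index-driven while loop (done-flag, per-character append, bound check) by slicing off the
-- leading run of CWE-id characters, measured loop-free via lstrip; return value only, no side effects.

-- ===== PORT A =====
-- character in 'cwe - 1234567890'
def pvAllowedA (c : Char) : Bool := PySem.Chars.isIn [c] "cwe - 1234567890".toList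

-- the 'while not cwe_done' loop of A (state: ini, cwe_id); the none branch of txt[ini] is unreachable
-- (the loop is entered with a valid index and stops before running past the end)
def cweLoopA (txt : List Char) (ini : Nat) (cwe_id : List Char) : List Char :=
  match PySem.List.pyGet? txt (ini : Int) with
  | none => cwe_id
  | some character =>
    if pvAllowedA character then
      if _h : ini + 1 ≥ txt.length then cwe_id ++ [character]
      else cweLoopA txt (ini + 1) (cwe_id ++ [character])
    else cwe_id
termination_by txt.length - ini
decreasing_by omega

def find_cwe_in_txt (search_in : String) : Option String :=
  if PySem.Str.len search_in < 5 then none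
  else
    let txt := PySem.Chars.replace (PySem.Chars.lower search_in.toList) [' '] []
    let ini := PySem.Chars.find txt "cwe-".toList
    let cwe_id : List Char := if ini ≠ -1 then cweLoopA txt ini.toNat [] else []
    if cwe_id ≠ [] then
      some (String.ofList (PySem.Chars.upper (PySem.Chars.replace cwe_id [' '] [])))
    else none

-- ===== PORT B =====
-- membership in the lstrip character set 'cwe0123456789-'
def pvCweChar (c : Char) : Bool := "cwe0123456789-".toList.contains c

def find_cwe_in_txt_alt (search_in : String) : Option String :=
  if PySem.Str.len search_in < 5 then none
  else
    let txt := PySem.Chars.replace (PySem.Chars.lower search_in.toList) [' '] []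
    let pos := PySem.Chars.find txt "cwe-".toList
    if pos = -1 then none
    else
      let tail := PySem.List.slice txt (some pos) none
      -- tail.lstrip('cwe0123456789-') drops exactly the leading chars belonging to that set (exact)
      let stripped := tail.dropWhile pvCweChar
      let token := PySem.List.slice tail none (some ((tail.length : Int) - (stripped.length : Int)))
      some (String.ofList (PySem.Chars.upper token))

-- ===== PRECONDITION & SPEC =====
def Spec_find_cwe_in_txt (search_in : String) (out : Option String) : Prop := out = find_cwe_in_txt_alt search_in
instance (search_in : String) (out : Option String) : Decidable (Spec_find_cwe_in_txt search_in out) := by unfold Spec_find_cwe_in_txt; infer_instance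

-- ===== CLAIM (what is proved, stated in full; the proofs are below) =====
def Claim_equal_find_cwe_in_txt : Prop := ∀ (search_in : String), Dom_find_cwe_in_txt search_in → Spec_find_cwe_in_txt search_in (find_cwe_in_txt search_in)

-- ===== LEMMAS AND PROOFS =====

-- replace s ' ' '' is filtering out the spaces
lemma replace_go_space (fuel : Nat) : ∀ (l acc : List Char), l.length ≤ fuel →
    PySem.Chars.replace.go [' '] [] fuel l acc = acc.reverse ++ l.filter (fun c => !(c == ' ')) := by
  induction fuel with
  | zero =>
    intro l acc hl
    have : l = [] := List.eq_nil_of_length_eq_zero (Nat.le_zero.mp hl)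
    subst this; simp [PySem.Chars.replace.go]
  | succ n ih =>
    intro l acc hl
    cases l with
    | nil => simp [PySem.Chars.replace.go]
    | cons c t =>
      by_cases hc : c = ' '
      · subst hc
        have hpre : List.isPrefixOf [' '] (' ' :: t) = true := by simp [List.isPrefixOf]
        simp only [PySem.Chars.replace.go, hpre, if_pos]
        rw [show List.drop ([' '] : List Char).length (' ' :: t) = t from rfl,
            show (([] : List Char).reverse ++ acc) = acc from rfl]
        rw [ih t acc (by simpa using Nat.le_of_succ_le_succ hl)]
        simp
      · have hpre : List.isPrefixOf [' '] (c :: t) = false := by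
          simp [List.isPrefixOf]; exact fun h => hc h.symm
        simp only [PySem.Chars.replace.go, hpre]
        rw [ih t (c :: acc) (by simpa using Nat.le_of_succ_le_succ hl)]
        simp [hc]

lemma replace_space_filter (l : List Char) :
    PySem.Chars.replace l [' '] [] = l.filter (fun c => !(c == ' ')) := by
  rw [PySem.Chars.replace]
  simp only [List.isEmpty_cons]
  exact replace_go_space l.length l [] le_rfl

-- takeWhile only looks at the members of the list
lemma takeWhile_congr_mem {p q : Char → Bool} : ∀ (l : List Char), (∀ a ∈ l, p a = q a) →
    l.takeWhile p = l.takeWhile q := by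
  intro l
  induction l with
  | nil => intro _; rfl
  | cons c t ih =>
    intro h
    have hc := h c (List.mem_cons_self)
    simp only [List.takeWhile_cons, hc]
    cases hq : q c
    · simp
    · simp [ih (fun a ha => h a (List.mem_cons_of_mem _ ha))]

-- away from ' ' (which txt does not contain), A's membership test agrees with B's lstrip set
lemma allowed_eq_cwechar (c : Char) (hc : ¬ c = ' ') : pvAllowedA c = pvCweChar c := by
  rw [Bool.eq_iff_iff, pvAllowedA, pvCweChar,
    PySem.Chars.isIn_iff_infix, List.singleton_infix_iff]
  have h1 : "cwe - 1234567890".toList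
      = ['c','w','e',' ','-',' ','1','2','3','4','5','6','7','8','9','0'] := by decide
  have h2 : "cwe0123456789-".toList
      = ['c','w','e','0','1','2','3','4','5','6','7','8','9','-'] := by decide
  rw [h1, h2]
  simp only [List.contains_eq_mem, List.mem_cons, List.not_mem_nil, or_false, decide_eq_true_eq]
  tauto

-- A's while loop collects the allowed-character prefix starting at ini
lemma cweLoopA_eq (txt : List Char) : ∀ (fuel ini : Nat) (acc : List Char),
    txt.length - ini = fuel → ini < txt.length →
    cweLoopA txt ini acc = acc ++ (txt.drop ini).takeWhile pvAllowedA := by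
  intro fuel
  induction fuel with
  | zero => intro ini acc hfu hlt; omega
  | succ n ih =>
    intro ini acc hfu hlt
    rw [cweLoopA]
    simp only [PySem.List.pyGet?_natCast, List.getElem?_eq_getElem hlt]
    rw [List.drop_eq_getElem_cons hlt, List.takeWhile_cons]
    by_cases hall : pvAllowedA txt[ini] = true
    · rw [if_pos hall, if_pos hall]
      by_cases hend : ini + 1 ≥ txt.length
      · rw [dif_pos hend, List.drop_eq_nil_iff.mpr hend]
        simp
      · rw [dif_neg hend, ih (ini + 1) (acc ++ [txt[ini]]) (by omega) (by omega)]
        simp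
    · rw [if_neg hall, if_neg hall]
      simp

theorem find_cwe_in_txt_spec_aux (s : String) :
    find_cwe_in_txt s = find_cwe_in_txt_alt s := by
  unfold find_cwe_in_txt find_cwe_in_txt_alt
  by_cases h5 : PySem.Str.len s < 5
  · rw [if_pos h5, if_pos h5]
  · simp only [if_neg h5]
    set txt := PySem.Chars.replace (PySem.Chars.lower s.toList) [' '] [] with htxt
    have hns : ∀ c ∈ txt, ¬ c = ' ' := by
      rw [htxt, replace_space_filter]
      intro c hc
      have := (List.mem_filter.mp hc).2
      simpa using this
    set iZ := PySem.Chars.find txt "cwe-".toList with hiZ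
    by_cases hf : iZ = -1
    · rw [if_neg (not_not_intro hf), if_neg (by simp), if_pos hf]
    · have h0 : 0 ≤ iZ := by
        have := PySem.Chars.neg_one_le_find txt "cwe-".toList
        rw [← hiZ] at this; omega
      set i := iZ.toNat with hi
      have hpre : "cwe-".toList <+: txt.drop i := (PySem.Chars.find_spec (hiZ ▸ h0)).1
      have hlt : i < txt.length := by
        by_contra hcon
        have hnil : txt.drop i = [] := List.drop_eq_nil_iff.mpr (by omega)
        rw [hnil] at hpre
        have := hpre.length_le
        simp at this
      have htail : PySem.List.slice txt (some iZ) none = txt.drop i := by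
        rw [PySem.List.slice_from txt h0]
      have hagree : (txt.drop i).takeWhile pvAllowedA = (txt.drop i).takeWhile pvCweChar := by
        apply takeWhile_congr_mem
        intro a ha
        exact allowed_eq_cwechar a (hns a (List.drop_subset i txt ha))
      have hloop : cweLoopA txt i [] = (txt.drop i).takeWhile pvAllowedA :=
        cweLoopA_eq txt (txt.length - i) i [] rfl hlt
      obtain ⟨rest, hrest⟩ := hpre
      have hdrop : txt.drop i = 'c' :: ('w' :: 'e' :: '-' :: rest) := by
        rw [← hrest]; rfl
      have hne : (txt.drop i).takeWhile pvAllowedA ≠ [] := by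
        rw [hdrop, List.takeWhile_cons]
        have hcA : pvAllowedA 'c' = true := by decide
        simp [hcA]
      have hlen : ((txt.drop i).takeWhile pvCweChar).length
          + ((txt.drop i).dropWhile pvCweChar).length = (txt.drop i).length := by
        rw [← List.length_append, List.takeWhile_append_dropWhile]
      have htok : PySem.List.slice (txt.drop i) none
          (some (((txt.drop i).length : Int) - (((txt.drop i).dropWhile pvCweChar).length : Int)))
          = (txt.drop i).takeWhile pvCweChar := by
        rw [PySem.List.slice_to (txt.drop i) (by omega)]
        have h1 : ((((txt.drop i).length : Int))
            - (((txt.drop i).dropWhile pvCweChar).length : Int)).toNat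
            = ((txt.drop i).takeWhile pvCweChar).length := by omega
        rw [h1]
        exact (List.prefix_iff_eq_take.mp (List.takeWhile_prefix pvCweChar)).symm
      have hrep : PySem.Chars.replace ((txt.drop i).takeWhile pvAllowedA) [' '] []
          = (txt.drop i).takeWhile pvAllowedA := by
        rw [replace_space_filter]
        apply List.filter_eq_self.mpr
        intro a ha
        have hmem : a ∈ txt.drop i := (List.takeWhile_prefix pvAllowedA).subset ha
        simpa using hns a (List.drop_subset i txt hmem)
      rw [if_pos hf, hloop, if_pos hne, if_neg hf]
      rw [hrep, hagree, htail, htok]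

-- ===== VERDICT (by name: the statement is the Claim_ definition above) =====
theorem find_cwe_in_txt_spec : Claim_equal_find_cwe_in_txt := by
  intro s _
  unfold Spec_find_cwe_in_txt
  exact find_cwe_in_txt_spec_aux s
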